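-- pv_equiv track=rewrite | github.com/qweqhwkwd-coder/tetris | tetris.py | rotations_from_pattern
-- ===== SOURCE A (Python) =====
-- def rotations_from_pattern(pattern):
--     # pattern: list of strings (rows), variable size
--     grid = [list(row) for row in pattern]
--     size = len(grid)
--     # pad to 4x4 for consistent rotations
--     padded = [['.' for _ in range(4)] for _ in range(4)]
--     for r in range(size):
--         for c in range(len(grid[r])):
--             padded[r][c] = grid[r][c]
--     states = []
--     mat = padded
--     for _ in range(4):
--         coords = []
--         for r in range(4):
--             for c in range(4):
--                 if mat[r][c] != '.':
--                     coords.append((r, c))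
--         min_r = min([p[0] for p in coords])
--         min_c = min([p[1] for p in coords])
--         norm = sorted([(r - min_r, c - min_c) for r, c in coords])
--         if norm not in states:
--             states.append(norm)
--         # rotate 90 degrees
--         mat = [list(row) for row in zip(*mat[::-1])]
--     return states
-- ===== SOURCE B (Python) =====
-- def rotations_from_pattern(pattern):
--     # coordinate-based: rotate the cell list directly instead of rotating a matrix
--     coords = [(r, c) for r, row in enumerate(pattern)
--                      for c, ch in enumerate(row) if ch != '.']
--     states = []
--     for _ in range(4):
--         min_r = min(p[0] for p in coords)
--         min_c = min(p[1] for p in coords)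
--         norm = sorted((r - min_r, c - min_c) for r, c in coords)
--         if norm not in states:
--             states.append(norm)
--         coords = [(c, 3 - r) for r, c in coords]
--     return states
-- ===== Notes on version B (the rewrite author's own statement) =====
-- stated objective: simpler
-- what changed: B extracts the occupied-cell coordinate list from the pattern once and rotates it directly with (r,c) -> (c,3-r) each turn, instead of building a padded 4x4 character matrix, rotating it by reverse+zip and rescanning all 16 cells every turn.
import Mathlib
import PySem

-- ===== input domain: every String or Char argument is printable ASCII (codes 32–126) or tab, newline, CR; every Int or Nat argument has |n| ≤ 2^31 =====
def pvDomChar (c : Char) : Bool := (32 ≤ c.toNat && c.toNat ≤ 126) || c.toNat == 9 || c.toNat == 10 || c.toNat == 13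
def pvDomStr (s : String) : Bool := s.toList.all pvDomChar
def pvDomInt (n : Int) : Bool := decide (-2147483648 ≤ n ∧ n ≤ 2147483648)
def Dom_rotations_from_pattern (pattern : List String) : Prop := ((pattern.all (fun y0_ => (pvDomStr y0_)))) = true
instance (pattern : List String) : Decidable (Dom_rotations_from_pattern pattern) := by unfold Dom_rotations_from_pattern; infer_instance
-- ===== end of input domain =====

-- B rotates the coordinate list of occupied cells directly ((r,c) ↦ (c,3-r)) instead of
-- rotating a padded 4×4 character matrix and rescanning it each turn (objective: simpler).

-- ===== PORT A =====
-- zip(*rows): column i, for i below the shortest row length, holds row j's i-th element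
-- (exact CPython zip(*) semantics on lists of lists)
def pvZipStar (rows : List (List Char)) : List (List Char) :=
  (List.range (((rows.map List.length).min?).getD 0)).map (fun i =>
    rows.map (fun row => row.getD i '.'))

-- padded[r][c] = v  (indices are in range on every input Pre_ admits)
def pvSet2 (m : List (List Char)) (r c : Int) (v : Char) : List (List Char) :=
  PySem.List.pySetD m r (PySem.List.pySetD (PySem.List.pyGetD m r []) c v)

def rotations_from_pattern (pattern : List String) : List (List (Int × Int)) :=
  let grid : List (List Char) := pattern.map String.toList
  let size : Int := grid.length
  let padded0 : List (List Char) :=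
    (PySem.List.pyRange 0 4).map (fun _ => (PySem.List.pyRange 0 4).map (fun _ => '.'))
  let padded := (PySem.List.pyRange 0 size).foldl (fun pd r =>
      (PySem.List.pyRange 0 ((PySem.List.pyGetD grid r []).length : Int)).foldl (fun pd c =>
          pvSet2 pd r c (PySem.List.pyGetD (PySem.List.pyGetD grid r []) c '.')) pd) padded0
  let res := (PySem.List.pyRange 0 4).foldl (fun (st : List (List (Int × Int)) × List (List Char)) _ =>
      let states := st.1
      let mat := st.2
      let coords : List (Int × Int) := (PySem.List.pyRange 0 4).foldl (fun acc r =>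
          (PySem.List.pyRange 0 4).foldl (fun acc c =>
              if PySem.List.pyGetD (PySem.List.pyGetD mat r []) c '.' ≠ '.' then acc ++ [(r, c)]
              else acc) acc) []
      -- min([...]) raises ValueError on an empty list: Pre_ excludes patterns with no occupied cell
      let min_r := (PySem.List.min? (coords.map (fun p => p.1)) (fun x => x)).getD 0
      let min_c := (PySem.List.min? (coords.map (fun p => p.2)) (fun x => x)).getD 0
      -- sorted on tuples: Python's lexicographic order = the Lex (Int × Int) linear order
      let norm := PySem.List.sorted (coords.map (fun p => (p.1 - min_r, p.2 - min_c)))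
                    (fun p => toLex p) false
      let states := if norm ∈ states then states else states ++ [norm]
      -- zip(*mat[::-1]): mat[::-1] is reverse, zip(*·) is pvZipStar
      (states, pvZipStar mat.reverse)) ([], padded)
  res.1

-- ===== PORT B =====
def rotations_from_pattern_alt (pattern : List String) : List (List (Int × Int)) :=
  let coords : List (Int × Int) := (PySem.List.enumerate pattern).flatMap (fun rw =>
      ((PySem.List.enumerate rw.2.toList).filter (fun cc => cc.2 != '.')).map
        (fun cc => (rw.1, cc.1)))
  let res := (PySem.List.pyRange 0 4).foldl (fun (st : List (List (Int × Int)) × List (Int × Int)) _ =>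
      let states := st.1
      let cs := st.2
      -- min(...) raises ValueError on an empty sequence: Pre_ excludes patterns with no occupied cell
      let min_r := (PySem.List.min? (cs.map (fun p => p.1)) (fun x => x)).getD 0
      let min_c := (PySem.List.min? (cs.map (fun p => p.2)) (fun x => x)).getD 0
      let norm := PySem.List.sorted (cs.map (fun p => (p.1 - min_r, p.2 - min_c)))
                    (fun p => toLex p) false
      let states := if norm ∈ states then states else states ++ [norm]
      (states, cs.map (fun p => (p.2, 3 - p.1)))) ([], coords)
  res.1

-- ===== PRECONDITION & SPEC =====
-- Pre_ is exactly where A returns: rows at index ≥ 4 must be empty and rows at index < 4 at most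
-- 4 long (otherwise the assignment padded[r][c] raises IndexError), and some cell must be
-- non-'.' (otherwise min([]) raises ValueError).
def Pre_rotations_from_pattern (pattern : List String) : Prop :=
  (∀ s ∈ pattern.drop 4, s.toList = []) ∧
  (∀ s ∈ pattern.take 4, PySem.Str.len s ≤ 4) ∧
  (pattern.any (fun s => s.toList.any (fun c => c != '.')) = true)
instance (pattern : List String) : Decidable (Pre_rotations_from_pattern pattern) := by
  unfold Pre_rotations_from_pattern; infer_instance

def pvWitness_rotations_from_pattern : List String := ["##", ".#"]

def Spec_rotations_from_pattern (pattern : List String) (out : List (List (Int × Int))) : Prop :=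
  out = rotations_from_pattern_alt pattern
instance (pattern : List String) (out : List (List (Int × Int))) :
    Decidable (Spec_rotations_from_pattern pattern out) := by
  unfold Spec_rotations_from_pattern; infer_instance

-- ===== CLAIM (what is proved, stated in full; the proofs are below) =====
def Claim_equal_rotations_from_pattern : Prop :=
  ∀ (pattern : List String), Dom_rotations_from_pattern pattern →
    Pre_rotations_from_pattern pattern →
      Spec_rotations_from_pattern pattern (rotations_from_pattern pattern)

-- ===== LEMMAS AND PROOFS =====

def pvG (m : List (List Char)) (r c : Int) : Char :=
  PySem.List.pyGetD (PySem.List.pyGetD m r []) c '.'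

-- the occupied cells of a 4×4 matrix, in A's row-major scan order
def pvCells (mat : List (List Char)) : List (Int × Int) :=
  (PySem.List.pyRange 0 4).foldl (fun acc r =>
      (PySem.List.pyRange 0 4).foldl (fun acc c =>
          if pvG mat r c ≠ '.' then acc ++ [(r, c)]
          else acc) acc) []

def pvShape (m : List (List Char)) : Prop := m.length = 4 ∧ ∀ row ∈ m, row.length = 4

-- one loop step of port A / port B
def pvStepA (st : List (List (Int × Int)) × List (List Char)) (_ : Int) :
    List (List (Int × Int)) × List (List Char) :=
  let states := st.1
  let mat := st.2
  let coords := pvCells mat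
  let min_r := (PySem.List.min? (coords.map (fun p => p.1)) (fun x => x)).getD 0
  let min_c := (PySem.List.min? (coords.map (fun p => p.2)) (fun x => x)).getD 0
  let norm := PySem.List.sorted (coords.map (fun p => (p.1 - min_r, p.2 - min_c)))
                (fun p => toLex p) false
  let states := if norm ∈ states then states else states ++ [norm]
  (states, pvZipStar mat.reverse)

def pvStepB (st : List (List (Int × Int)) × List (Int × Int)) (_ : Int) :
    List (List (Int × Int)) × List (Int × Int) :=
  let states := st.1
  let cs := st.2
  let min_r := (PySem.List.min? (cs.map (fun p => p.1)) (fun x => x)).getD 0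
  let min_c := (PySem.List.min? (cs.map (fun p => p.2)) (fun x => x)).getD 0
  let norm := PySem.List.sorted (cs.map (fun p => (p.1 - min_r, p.2 - min_c)))
                (fun p => toLex p) false
  let states := if norm ∈ states then states else states ++ [norm]
  (states, cs.map (fun p => (p.2, 3 - p.1)))

def pvPad0 : List (List Char) :=
  (PySem.List.pyRange 0 4).map (fun _ => (PySem.List.pyRange 0 4).map (fun _ => '.'))

def pvFillRow (grid : List (List Char)) (r : Int) (pd : List (List Char)) : List (List Char) :=
  (PySem.List.pyRange 0 ((PySem.List.pyGetD grid r []).length : Int)).foldl (fun pd c =>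
      pvSet2 pd r c (PySem.List.pyGetD (PySem.List.pyGetD grid r []) c '.')) pd

def pvPadded (pattern : List String) : List (List Char) :=
  (PySem.List.pyRange 0 ((pattern.map String.toList).length : Int)).foldl
    (fun pd r => pvFillRow (pattern.map String.toList) r pd) pvPad0

def pvCoords0 (pattern : List String) : List (Int × Int) :=
  (PySem.List.enumerate pattern).flatMap (fun rw =>
      ((PySem.List.enumerate rw.2.toList).filter (fun cc => cc.2 != '.')).map
        (fun cc => (rw.1, cc.1)))

theorem portA_eq_fold (pattern : List String) :
    rotations_from_pattern pattern =
      ((PySem.List.pyRange 0 4).foldl pvStepA ([], pvPadded pattern)).1 := rfl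

theorem portB_eq_fold (pattern : List String) :
    rotations_from_pattern_alt pattern =
      ((PySem.List.pyRange 0 4).foldl pvStepB ([], pvCoords0 pattern)).1 := rfl

-- the invariant tying A's matrix to B's coordinate list
def pvInv (mat : List (List Char)) (cs : List (Int × Int)) : Prop :=
  pvShape mat ∧ cs.Nodup ∧ cs ≠ [] ∧ (∀ p, p ∈ cs ↔ p ∈ pvCells mat)

theorem cells_eq_flat (mat : List (List Char)) :
    pvCells mat = [0, 1, 2, 3].flatMap (fun r =>
      (([0, 1, 2, 3].filter (fun c => decide (pvG mat r c ≠ '.')))).map (fun c => (r, c))) := by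
  unfold pvCells
  have hR : PySem.List.pyRange 0 4 = ([0, 1, 2, 3] : List Int) := rfl
  rw [hR]
  rw [PySem.List.foldl_congr_mem _ _
    (fun acc r => acc ++ ([0, 1, 2, 3].filter (fun c => decide (pvG mat r c ≠ '.'))).map
      (fun c => (r, c))) _ ?_]
  · rw [PySem.List.foldl_append_eq_flatMap]
    simp
  · intro acc r _
    exact PySem.List.foldl_append_ite (fun c => pvG mat r c ≠ '.') (fun c => (r, c)) _ acc

theorem mem_cells (mat : List (List Char)) (p : Int × Int) :
    p ∈ pvCells mat ↔ ∃ r c, 0 ≤ r ∧ r < 4 ∧ 0 ≤ c ∧ c < 4 ∧ pvG mat r c ≠ '.' ∧ p = (r, c) := by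
  simp only [cells_eq_flat, List.mem_flatMap, List.mem_map, List.mem_filter,
    decide_eq_true_eq, List.mem_cons, List.not_mem_nil, or_false]
  constructor
  · rintro ⟨r, hr, c, ⟨hc, hne⟩, rfl⟩
    exact ⟨r, c, by omega, by omega, by omega, by omega, hne, rfl⟩
  · rintro ⟨r, c, h1, h2, h3, h4, hne, rfl⟩
    exact ⟨r, by omega, c, ⟨by omega, hne⟩, rfl⟩

theorem nodup_cells (mat : List (List Char)) : (pvCells mat).Nodup := by
  rw [cells_eq_flat, List.nodup_flatMap]
  constructor
  · intro r _
    refine (List.Nodup.filter _ (by decide)).map ?_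
    intro a b hab
    simpa using hab
  · have hne : List.Pairwise (fun a b => a ≠ b) ([0, 1, 2, 3] : List Int) := by decide
    refine hne.imp ?_
    intro a b hab
    rw [Function.onFun, List.disjoint_left]
    rintro p hp hq
    rw [List.mem_map] at hp hq
    obtain ⟨c, _, rfl⟩ := hp
    obtain ⟨c', _, hq⟩ := hq
    exact hab (by simpa using (congrArg Prod.fst hq).symm)

theorem pvLen4 {α : Type} (l : List α) (h : l.length = 4) : ∃ a b c d, l = [a, b, c, d] := by
  rcases l with _ | ⟨a, l⟩; · simp at h
  rcases l with _ | ⟨b, l⟩; · simp at h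
  rcases l with _ | ⟨c, l⟩; · simp at h
  rcases l with _ | ⟨d, l⟩; · simp at h
  rcases l with _ | ⟨e, l⟩
  · exact ⟨a, b, c, d, rfl⟩
  · simp at h

theorem shape_elim (m : List (List Char)) (h : pvShape m) :
    ∃ a₀ a₁ a₂ a₃ b₀ b₁ b₂ b₃ c₀ c₁ c₂ c₃ d₀ d₁ d₂ d₃ : Char,
      m = [[a₀, a₁, a₂, a₃], [b₀, b₁, b₂, b₃], [c₀, c₁, c₂, c₃], [d₀, d₁, d₂, d₃]] := by
  obtain ⟨hlen, hrow⟩ := h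
  obtain ⟨r₀, r₁, r₂, r₃, rfl⟩ := pvLen4 m hlen
  obtain ⟨a₀, a₁, a₂, a₃, rfl⟩ := pvLen4 r₀ (hrow _ (by simp))
  obtain ⟨b₀, b₁, b₂, b₃, rfl⟩ := pvLen4 r₁ (hrow _ (by simp))
  obtain ⟨c₀, c₁, c₂, c₃, rfl⟩ := pvLen4 r₂ (hrow _ (by simp))
  obtain ⟨d₀, d₁, d₂, d₃, rfl⟩ := pvLen4 r₃ (hrow _ (by simp))
  exact ⟨_, _, _, _, _, _, _, _, _, _, _, _, _, _, _, _, rfl⟩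

theorem zip4 (a₀ a₁ a₂ a₃ b₀ b₁ b₂ b₃ c₀ c₁ c₂ c₃ d₀ d₁ d₂ d₃ : Char) :
    pvZipStar [[a₀, a₁, a₂, a₃], [b₀, b₁, b₂, b₃], [c₀, c₁, c₂, c₃], [d₀, d₁, d₂, d₃]] =
      [[a₀, b₀, c₀, d₀], [a₁, b₁, c₁, d₁], [a₂, b₂, c₂, d₂], [a₃, b₃, c₃, d₃]] := rfl

theorem shape_rot (m : List (List Char)) (h : pvShape m) : pvShape (pvZipStar m.reverse) := by
  obtain ⟨a₀, a₁, a₂, a₃, b₀, b₁, b₂, b₃, c₀, c₁, c₂, c₃, d₀, d₁, d₂, d₃, rfl⟩ := shape_elim m h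
  have hrev : ([[a₀, a₁, a₂, a₃], [b₀, b₁, b₂, b₃], [c₀, c₁, c₂, c₃],
      [d₀, d₁, d₂, d₃]] : List (List Char)).reverse =
      [[d₀, d₁, d₂, d₃], [c₀, c₁, c₂, c₃], [b₀, b₁, b₂, b₃], [a₀, a₁, a₂, a₃]] := rfl
  rw [hrev, zip4]
  refine ⟨rfl, ?_⟩
  intro row hrow
  simp only [List.mem_cons, List.not_mem_nil, or_false] at hrow
  rcases hrow with rfl | rfl | rfl | rfl <;> rfl

theorem rot_get (m : List (List Char)) (h : pvShape m) (r c : Int)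
    (hr0 : 0 ≤ r) (hr : r < 4) (hc0 : 0 ≤ c) (hc : c < 4) :
    pvG (pvZipStar m.reverse) r c = pvG m (3 - c) r := by
  obtain ⟨a₀, a₁, a₂, a₃, b₀, b₁, b₂, b₃, c₀, c₁, c₂, c₃, d₀, d₁, d₂, d₃, rfl⟩ := shape_elim m h
  have hrev : ([[a₀, a₁, a₂, a₃], [b₀, b₁, b₂, b₃], [c₀, c₁, c₂, c₃],
      [d₀, d₁, d₂, d₃]] : List (List Char)).reverse =
      [[d₀, d₁, d₂, d₃], [c₀, c₁, c₂, c₃], [b₀, b₁, b₂, b₃], [a₀, a₁, a₂, a₃]] := rfl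
  rw [hrev, zip4]
  have hr' : r = 0 ∨ r = 1 ∨ r = 2 ∨ r = 3 := by omega
  have hc' : c = 0 ∨ c = 1 ∨ c = 2 ∨ c = 3 := by omega
  rcases hr' with rfl | rfl | rfl | rfl <;> rcases hc' with rfl | rfl | rfl | rfl <;> rfl

theorem min_eq_of_perm (l l' : List Int) (h : l.Perm l') :
    PySem.List.min? l (fun x => x) = PySem.List.min? l' (fun x => x) := by
  by_cases hnil : l = []
  · subst hnil
    rw [List.nil_perm] at h
    subst h
    rfl
  · have hnil' : l' ≠ [] := fun e => hnil (by subst e; exact h.eq_nil)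
    have h1 : PySem.List.min? l (fun x => x) ≠ none := by
      simpa [PySem.List.min?_eq_none_iff] using hnil
    have h2 : PySem.List.min? l' (fun x => x) ≠ none := by
      simpa [PySem.List.min?_eq_none_iff] using hnil'
    obtain ⟨m, hm⟩ := Option.ne_none_iff_exists'.mp h1
    obtain ⟨m', hm'⟩ := Option.ne_none_iff_exists'.mp h2
    have hmem := PySem.List.min?_mem hm
    have hmem' := PySem.List.min?_mem hm'
    have hle : m ≤ m' := PySem.List.min?_isMin hm m' (h.mem_iff.mpr hmem')
    have hle' : m' ≤ m := PySem.List.min?_isMin hm' m (h.mem_iff.mp hmem)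
    rw [hm, hm', le_antisymm hle hle']

theorem step_inv (mat : List (List Char)) (cs : List (Int × Int)) (h : pvInv mat cs) :
    pvInv (pvZipStar mat.reverse) (cs.map (fun p => (p.2, 3 - p.1))) := by
  obtain ⟨hs, hnd, hne, hmem⟩ := h
  refine ⟨shape_rot mat hs, ?_, ?_, ?_⟩
  · refine hnd.map ?_
    intro a b hab
    have h1 := congrArg Prod.fst hab
    have h2 := congrArg Prod.snd hab
    simp only at h1 h2
    exact Prod.ext (by omega) h1
  · simpa using hne
  · intro p
    rw [List.mem_map]
    constructor
    · rintro ⟨q, hq, rfl⟩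
      rw [hmem, mem_cells] at hq
      obtain ⟨r, c, h1, h2, h3, h4, hnz, rfl⟩ := hq
      rw [mem_cells]
      refine ⟨c, 3 - r, by omega, by omega, by omega, by omega, ?_, rfl⟩
      rw [rot_get mat hs c (3 - r) (by omega) (by omega) (by omega) (by omega)]
      have : (3 : Int) - (3 - r) = r := by omega
      rw [this]
      exact hnz
    · intro hp
      rw [mem_cells] at hp
      obtain ⟨r, c, h1, h2, h3, h4, hnz, rfl⟩ := hp
      rw [rot_get mat hs r c h1 h2 h3 h4] at hnz
      refine ⟨(3 - c, r), ?_, ?_⟩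
      · rw [hmem, mem_cells]
        exact ⟨3 - c, r, by omega, by omega, by omega, by omega, hnz, rfl⟩
      · exact Prod.ext rfl (by omega)

theorem step_eq (states : List (List (Int × Int))) (mat : List (List Char))
    (cs : List (Int × Int)) (i : Int) (h : pvInv mat cs) :
    (pvStepA (states, mat) i).1 = (pvStepB (states, cs) i).1 := by
  obtain ⟨hs, hnd, hne, hmem⟩ := h
  have hperm : cs.Perm (pvCells mat) :=
    (List.perm_ext_iff_of_nodup hnd (nodup_cells mat)).mpr hmem
  unfold pvStepA pvStepB
  have hmr : PySem.List.min? ((pvCells mat).map (fun p => p.1)) (fun x => x) =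
      PySem.List.min? (cs.map (fun p => p.1)) (fun x => x) :=
    min_eq_of_perm _ _ (hperm.map _).symm
  have hmc : PySem.List.min? ((pvCells mat).map (fun p => p.2)) (fun x => x) =
      PySem.List.min? (cs.map (fun p => p.2)) (fun x => x) :=
    min_eq_of_perm _ _ (hperm.map _).symm
  simp only [hmr, hmc]
  have hsorted : ∀ (mr mc : Int),
      PySem.List.sorted ((pvCells mat).map (fun p => (p.1 - mr, p.2 - mc)))
        (fun p => toLex p) false =
      PySem.List.sorted (cs.map (fun p => (p.1 - mr, p.2 - mc))) (fun p => toLex p) false := by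
    intro mr mc
    exact PySem.List.sorted_eq_sorted_of_perm _ _ _ toLex.injective (hperm.map _).symm
  rw [hsorted]

theorem loop_eq (L : List Int) (states : List (List (Int × Int))) (mat : List (List Char))
    (cs : List (Int × Int)) (h : pvInv mat cs) :
    (L.foldl pvStepA (states, mat)).1 = (L.foldl pvStepB (states, cs)).1 := by
  induction L generalizing states mat cs with
  | nil => rfl
  | cons a L ih =>
    rw [List.foldl_cons, List.foldl_cons]
    have hA : pvStepA (states, mat) a =
        ((pvStepB (states, cs) a).1, pvZipStar mat.reverse) := by
      refine Prod.ext ?_ rfl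
      exact step_eq states mat cs a h
    have hB : pvStepB (states, cs) a =
        ((pvStepB (states, cs) a).1, cs.map (fun p => (p.2, 3 - p.1))) := Prod.ext rfl rfl
    rw [hA, hB]
    exact ih _ _ _ (step_inv mat cs h)

theorem pvG_nil (c : Int) : PySem.List.pyGetD ([] : List Char) c '.' = '.' := by
  refine PySem.List.pyGetD_of_none _ _ _ ?_
  rw [PySem.List.pyGet?_eq_none_iff]
  rintro ⟨h1, h2⟩
  simp at h1 h2
  omega

theorem pyGetD_out (w : List Char) (c : Int) (hc0 : 0 ≤ c) (hc : (w.length : Int) ≤ c) :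
    PySem.List.pyGetD w c '.' = '.' := by
  refine PySem.List.pyGetD_of_none _ _ _ ?_
  rw [PySem.List.pyGet?_eq_none_iff]
  rintro ⟨h1, h2⟩
  omega

theorem pvG_out (m : List (List Char)) (r c : Int) (hr0 : 0 ≤ r)
    (hrlen : (m.length : Int) ≤ r) : pvG m r c = '.' := by
  unfold pvG
  have : PySem.List.pyGetD m r [] = [] := by
    refine PySem.List.pyGetD_of_none _ _ _ ?_
    rw [PySem.List.pyGet?_eq_none_iff]
    rintro ⟨h1, h2⟩
    omega
  rw [this, pvG_nil]

theorem pvG_pad0 (r c : Int) (hr0 : 0 ≤ r) (hr : r < 4) (hc0 : 0 ≤ c) (hc : c < 4) :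
    pvG pvPad0 r c = '.' := by
  have hr' : r = 0 ∨ r = 1 ∨ r = 2 ∨ r = 3 := by omega
  have hc' : c = 0 ∨ c = 1 ∨ c = 2 ∨ c = 3 := by omega
  rcases hr' with rfl | rfl | rfl | rfl <;> rcases hc' with rfl | rfl | rfl | rfl <;> rfl

theorem set2_get (pd : List (List Char)) (hs : pvShape pd) (k j : Int)
    (hk0 : 0 ≤ k) (hk : k < 4) (hj0 : 0 ≤ j) (hj : j < 4) (v : Char) (r c : Int)
    (hr0 : 0 ≤ r) (hr : r < 4) (hc0 : 0 ≤ c) (hc : c < 4) :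
    pvG (pvSet2 pd k j v) r c = if r = k ∧ c = j then v else pvG pd r c := by
  obtain ⟨a₀, a₁, a₂, a₃, b₀, b₁, b₂, b₃, c₀, c₁, c₂, c₃, d₀, d₁, d₂, d₃, rfl⟩ := shape_elim pd hs
  have hk' : k = 0 ∨ k = 1 ∨ k = 2 ∨ k = 3 := by omega
  have hj' : j = 0 ∨ j = 1 ∨ j = 2 ∨ j = 3 := by omega
  have hr' : r = 0 ∨ r = 1 ∨ r = 2 ∨ r = 3 := by omega
  have hc' : c = 0 ∨ c = 1 ∨ c = 2 ∨ c = 3 := by omega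
  rcases hk' with rfl | rfl | rfl | rfl <;> rcases hj' with rfl | rfl | rfl | rfl <;>
    rcases hr' with rfl | rfl | rfl | rfl <;> rcases hc' with rfl | rfl | rfl | rfl <;> rfl

theorem set2_shape (pd : List (List Char)) (hs : pvShape pd) (k j : Int)
    (hk0 : 0 ≤ k) (hk : k < 4) (v : Char) : pvShape (pvSet2 pd k j v) := by
  unfold pvSet2
  rw [PySem.List.pySetD_of_nonneg _ _ hk0]
  refine ⟨by rw [List.length_set]; exact hs.1, ?_⟩
  intro row hrowmem
  rcases List.mem_or_eq_of_mem_set hrowmem with hmem | heq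
  · exact hs.2 _ hmem
  · subst heq
    rw [PySem.List.length_pySetD]
    exact hs.2 _ (PySem.List.pyGetD_mem pd [] ⟨by have h := hs.1; omega, by have h := hs.1; omega⟩)

theorem rowfill (k : Int) (hk0 : 0 ≤ k) (hk : k < 4) (w : List Char) (hw : w.length ≤ 4)
    (n : Nat) (hn : n ≤ w.length) :
    ∀ pd, pvShape pd →
      pvShape ((PySem.List.pyRange 0 (n : Int)).foldl
        (fun pd c => pvSet2 pd k c (PySem.List.pyGetD w c '.')) pd) ∧
      ∀ r c : Int, 0 ≤ r → r < 4 → 0 ≤ c → c < 4 →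
        pvG ((PySem.List.pyRange 0 (n : Int)).foldl
          (fun pd c => pvSet2 pd k c (PySem.List.pyGetD w c '.')) pd) r c =
        if r = k ∧ c < (n : Int) then PySem.List.pyGetD w c '.' else pvG pd r c := by
  induction n with
  | zero =>
    intro pd hs
    refine ⟨hs, ?_⟩
    intro r c hr0 hr hc0 hc
    rw [if_neg (by omega : ¬ (r = k ∧ c < ((0 : Nat) : Int)))]
    rfl
  | succ n ih =>
    intro pd hs
    have hcast : ((n + 1 : Nat) : Int) = (n : Int) + 1 := by push_cast; ring
    rw [hcast, PySem.List.pyRange_one_succ_right (by positivity), List.foldl_append,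
      List.foldl_cons, List.foldl_nil]
    obtain ⟨ihs, ihg⟩ := ih (by omega) pd hs
    have hn4 : (n : Int) < 4 := by omega
    refine ⟨set2_shape _ ihs k (n : Int) hk0 hk _, ?_⟩
    intro r c hr0 hr hc0 hc
    rw [set2_get _ ihs k (n : Int) hk0 hk (by positivity) hn4 _ r c hr0 hr hc0 hc]
    rw [ihg r c hr0 hr hc0 hc]
    by_cases h1 : r = k ∧ c = (n : Int)
    · rw [if_pos h1, if_pos ⟨h1.1, by omega⟩, h1.2]
    · rw [if_neg h1]
      by_cases h2 : r = k ∧ c < (n : Int)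
      · rw [if_pos h2, if_pos ⟨h2.1, by omega⟩]
      · have hcn : ¬ (r = k ∧ c < (n : Int) + 1) := by
          rintro ⟨e1, e2⟩
          rcases (by omega : c = (n : Int) ∨ c < (n : Int)) with e | e
          · exact h1 ⟨e1, e⟩
          · exact h2 ⟨e1, e⟩
        rw [if_neg h2, if_neg hcn]

theorem colfill (pattern : List String)
    (h4 : ∀ s ∈ pattern.drop 4, s.toList = [])
    (hlen : ∀ s ∈ pattern.take 4, s.toList.length ≤ 4)
    (n : Nat) (hn : n ≤ pattern.length) :
    pvShape ((PySem.List.pyRange 0 (n : Int)).foldl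
      (fun pd r => pvFillRow (pattern.map String.toList) r pd) pvPad0) ∧
    ∀ r c : Int, 0 ≤ r → r < 4 → 0 ≤ c → c < 4 →
      pvG ((PySem.List.pyRange 0 (n : Int)).foldl
        (fun pd r => pvFillRow (pattern.map String.toList) r pd) pvPad0) r c =
      if r < (n : Int) then pvG (pattern.map String.toList) r c else '.' := by
  induction n with
  | zero =>
    have hz : (PySem.List.pyRange 0 ((0 : Nat) : Int)).foldl
        (fun pd r => pvFillRow (pattern.map String.toList) r pd) pvPad0 = pvPad0 := rfl
    rw [hz]
    refine ⟨⟨rfl, ?_⟩, ?_⟩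
    · intro row hrow
      have hp0 : pvPad0 = [['.', '.', '.', '.'], ['.', '.', '.', '.'], ['.', '.', '.', '.'],
          ['.', '.', '.', '.']] := rfl
      rw [hp0] at hrow
      simp only [List.mem_cons, List.not_mem_nil, or_false] at hrow
      rcases hrow with rfl | rfl | rfl | rfl <;> rfl
    intro r c hr0 hr hc0 hc
    rw [if_neg (by omega : ¬ r < ((0 : Nat) : Int))]
    exact pvG_pad0 r c hr0 hr hc0 hc
  | succ n ih =>
    have hcast : ((n + 1 : Nat) : Int) = (n : Int) + 1 := by push_cast; ring
    rw [hcast, PySem.List.pyRange_one_succ_right (by positivity), List.foldl_append,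
      List.foldl_cons, List.foldl_nil]
    obtain ⟨ihs, ihg⟩ := ih (by omega)
    have hnlen : n < pattern.length := by omega
    have hw : PySem.List.pyGetD (pattern.map String.toList) (n : Int) [] =
        (pattern[n]'hnlen).toList := by
      rw [PySem.List.pyGetD_natCast, List.getD_eq_getElem?_getD]
      simp [hnlen]
    by_cases h4n : 4 ≤ n
    · -- row n is empty: the inner loop does nothing
      have hempty : (pattern[n]'hnlen).toList = [] := by
        refine h4 _ ?_
        have : pattern[n]'hnlen = (pattern.drop 4)[n - 4]'(by simp; omega) := by
          rw [List.getElem_drop]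
          congr 1
          omega
        rw [this]
        exact List.getElem_mem _
      have hrowid : ∀ pd', pvFillRow (pattern.map String.toList) (n : Int) pd' = pd' := by
        intro pd'
        unfold pvFillRow
        rw [hw, hempty]
        rfl
      rw [hrowid]
      refine ⟨ihs, ?_⟩
      intro r c hr0 hr hc0 hc
      rw [ihg r c hr0 hr hc0 hc]
      by_cases h : r < (n : Int)
      · rw [if_pos h, if_pos (by omega)]
      · rw [if_neg h, if_neg (by omega)]
    · -- row n is within the 4×4 frame
      have hn4 : n < 4 := by omega
      have hwlen : (pattern[n]'hnlen).toList.length ≤ 4 := by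
        refine hlen _ ?_
        have : pattern[n]'hnlen = (pattern.take 4)[n]'(by simp; omega) := by
          rw [List.getElem_take]
        rw [this]
        exact List.getElem_mem _
      have hfr : ∀ pd', pvFillRow (pattern.map String.toList) (n : Int) pd' =
          (PySem.List.pyRange 0 (((pattern[n]'hnlen).toList.length : Nat) : Int)).foldl
            (fun pd c => pvSet2 pd (n : Int) c
              (PySem.List.pyGetD (pattern[n]'hnlen).toList c '.')) pd' := by
        intro pd'
        unfold pvFillRow
        rw [hw]
      rw [hfr]
      obtain ⟨rs, rg⟩ := rowfill (n : Int) (by positivity) (by omega)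
        (pattern[n]'hnlen).toList hwlen (pattern[n]'hnlen).toList.length (le_refl _) _ ihs
      refine ⟨rs, ?_⟩
      intro r c hr0 hr hc0 hc
      rw [rg r c hr0 hr hc0 hc, ihg r c hr0 hr hc0 hc]
      by_cases hrn : r = (n : Int)
      · subst hrn
        rw [if_neg (show ¬ ((n : Int) < (n : Int)) by omega),
          if_pos (show (n : Int) < (n : Int) + 1 by omega)]
        by_cases hcw : c < ((pattern[n]'hnlen).toList.length : Int)
        · rw [if_pos ⟨rfl, hcw⟩]
          unfold pvG
          rw [hw]
        · rw [if_neg (by tauto)]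
          unfold pvG
          rw [hw, pyGetD_out _ c hc0 (by omega)]
      · rw [if_neg (by tauto)]
        by_cases h : r < (n : Int)
        · rw [if_pos h, if_pos (by omega)]
        · rw [if_neg h, if_neg (by omega)]

theorem padded_eq_colfill (pattern : List String) :
    pvPadded pattern = (PySem.List.pyRange 0 ((pattern.length : Nat) : Int)).foldl
      (fun pd r => pvFillRow (pattern.map String.toList) r pd) pvPad0 := by
  unfold pvPadded
  rw [List.length_map]

theorem shape_padded (pattern : List String)
    (h4 : ∀ s ∈ pattern.drop 4, s.toList = [])
    (hlen : ∀ s ∈ pattern.take 4, s.toList.length ≤ 4) :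
    pvShape (pvPadded pattern) := by
  rw [padded_eq_colfill]
  exact (colfill pattern h4 hlen pattern.length (le_refl _)).1

theorem padded_get (pattern : List String)
    (h4 : ∀ s ∈ pattern.drop 4, s.toList = [])
    (hlen : ∀ s ∈ pattern.take 4, s.toList.length ≤ 4)
    (r c : Int) (hr0 : 0 ≤ r) (hr : r < 4) (hc0 : 0 ≤ c) (hc : c < 4) :
    pvG (pvPadded pattern) r c = pvG (pattern.map String.toList) r c := by
  rw [padded_eq_colfill]
  rw [(colfill pattern h4 hlen pattern.length (le_refl _)).2 r c hr0 hr hc0 hc]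
  by_cases h : r < (pattern.length : Int)
  · rw [if_pos h]
  · rw [if_neg h]
    rw [pvG_out _ r c hr0 (by simpa using by omega : ((pattern.map String.toList).length : Int) ≤ r)]

theorem grid_row (pattern : List String) (r : Int) (hr0 : 0 ≤ r)
    (hk : r.toNat < pattern.length) :
    PySem.List.pyGetD (pattern.map String.toList) r [] =
      (pattern[r.toNat]'hk).toList := by
  rw [PySem.List.pyGetD_of_nonneg _ _ hr0, List.getD_eq_getElem?_getD]
  simp [hk]

theorem grid_at (pattern : List String) (r c : Int) (hr0 : 0 ≤ r) (hc0 : 0 ≤ c)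
    (hk : r.toNat < pattern.length)
    (hj : c.toNat < (pattern[r.toNat]'hk).toList.length) :
    pvG (pattern.map String.toList) r c = (pattern[r.toNat]'hk).toList[c.toNat]'hj := by
  unfold pvG
  rw [grid_row pattern r hr0 hk, PySem.List.pyGetD_of_nonneg _ _ hc0,
    List.getD_eq_getElem?_getD, List.getElem?_eq_getElem hj]
  rfl

theorem mem_coords0 (pattern : List String) (p : Int × Int) :
    p ∈ pvCoords0 pattern ↔ ∃ k, ∃ hk : k < pattern.length, ∃ j,
      ∃ hj : j < (pattern[k]'hk).toList.length,
        (pattern[k]'hk).toList[j]'hj ≠ '.' ∧ p = ((k : Int), (j : Int)) := by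
  unfold pvCoords0
  simp only [List.mem_flatMap, List.mem_map, List.mem_filter,
    PySem.List.mem_enumerate_iff, bne_iff_ne, ne_eq]
  constructor
  · rintro ⟨rw, ⟨k, hk, rfl⟩, cc, ⟨⟨j, hj, rfl⟩, hne⟩, rfl⟩
    exact ⟨k, hk, j, by simpa using hj, by simpa using hne, by simp⟩
  · rintro ⟨k, hk, j, hj, hne, rfl⟩
    refine ⟨(0 + (k : Int), pattern[k]'hk), ⟨k, hk, rfl⟩,
      ((0 : Int) + (j : Int), (pattern[k]'hk).toList[j]'hj), ⟨⟨j, by simpa using hj, rfl⟩,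
        by simpa using hne⟩, by simp⟩

theorem nodup_coords0 (pattern : List String) : (pvCoords0 pattern).Nodup := by
  unfold pvCoords0
  rw [List.nodup_flatMap]
  constructor
  · intro rw _
    have h1 : List.Pairwise (fun a b => a.1 < b.1) (PySem.List.enumerate rw.2.toList 0) :=
      PySem.List.pairwise_lt_enumerate _ _
    have h2 : List.Pairwise (fun a b => a ≠ b)
        (((PySem.List.enumerate rw.2.toList).filter (fun cc => cc.2 != '.')).map
          (fun cc => (rw.1, cc.1))) := by
      refine List.Pairwise.map _ ?_ (h1.filter (fun cc => cc.2 != '.'))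
      intro a b hab heq
      have := congrArg Prod.snd heq
      simp only at this
      omega
    exact h2
  · refine (PySem.List.pairwise_lt_enumerate pattern 0).imp ?_
    intro a b hab
    rw [Function.onFun, List.disjoint_left]
    rintro p hp hq
    rw [List.mem_map] at hp hq
    obtain ⟨cc, _, rfl⟩ := hp
    obtain ⟨cc', _, hq⟩ := hq
    have := congrArg Prod.fst hq
    simp only at this
    omega

theorem init_inv (pattern : List String) (hpre : Pre_rotations_from_pattern pattern) :
    pvInv (pvPadded pattern) (pvCoords0 pattern) := by
  obtain ⟨h4, hlen', hexb⟩ := hpre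
  have hex : ∃ s ∈ pattern, ∃ c ∈ s.toList, c ≠ '.' := by
    rw [List.any_eq_true] at hexb
    obtain ⟨s, hs, hb⟩ := hexb
    rw [List.any_eq_true] at hb
    obtain ⟨c, hc, hb⟩ := hb
    exact ⟨s, hs, c, hc, by simpa using hb⟩
  have hlen : ∀ s ∈ pattern.take 4, s.toList.length ≤ 4 := by
    intro s hs
    have := hlen' s hs
    rw [PySem.Str.len_eq] at this
    exact_mod_cast this
  have hdropmem : ∀ (k : Nat) (hk : k < pattern.length), 4 ≤ k →
      (pattern[k]'hk).toList = [] := by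
    intro k hk hk4
    refine h4 _ ?_
    have : pattern[k]'hk = (pattern.drop 4)[k - 4]'(by simp; omega) := by
      rw [List.getElem_drop]
      congr 1
      omega
    rw [this]
    exact List.getElem_mem _
  have htakemem : ∀ (k : Nat) (hk : k < pattern.length), k < 4 →
      (pattern[k]'hk).toList.length ≤ 4 := by
    intro k hk hk4
    refine hlen _ ?_
    have : pattern[k]'hk = (pattern.take 4)[k]'(by simp; omega) := by
      rw [List.getElem_take]
    rw [this]
    exact List.getElem_mem _
  have hmem : ∀ p, p ∈ pvCoords0 pattern ↔ p ∈ pvCells (pvPadded pattern) := by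
    intro p
    rw [mem_coords0, mem_cells]
    constructor
    · rintro ⟨k, hk, j, hj, hne, rfl⟩
      have hk4 : k < 4 := by
        by_contra hcon
        rw [hdropmem k hk (by omega)] at hj
        simp at hj
      have hj4 : j < 4 := by
        have := htakemem k hk hk4
        omega
      refine ⟨(k : Int), (j : Int), by positivity, by exact_mod_cast hk4, by positivity,
        by exact_mod_cast hj4, ?_, rfl⟩
      rw [padded_get pattern h4 hlen _ _ (by positivity) (by exact_mod_cast hk4)
        (by positivity) (by exact_mod_cast hj4)]
      rw [grid_at pattern _ _ (by positivity) (by positivity) (by simpa using hk)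
        (by simpa using hj)]
      simpa using hne
    · rintro ⟨r, c, h1, h2, h3, h4', hne, rfl⟩
      rw [padded_get pattern h4 hlen r c h1 h2 h3 h4'] at hne
      have hk : r.toNat < pattern.length := by
        by_contra hcon
        rw [pvG_out _ r c h1 (by simp; omega)] at hne
        exact hne rfl
      have hj : c.toNat < (pattern[r.toNat]'hk).toList.length := by
        by_contra hcon
        unfold pvG at hne
        rw [grid_row pattern r h1 hk, pyGetD_out _ c h3 (by omega)] at hne
        exact hne rfl
      rw [grid_at pattern r c h1 h3 hk hj] at hne
      exact ⟨r.toNat, hk, c.toNat, hj, hne,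
        Prod.ext (by simp [Int.toNat_of_nonneg h1]) (by simp [Int.toNat_of_nonneg h3])⟩
  refine ⟨shape_padded pattern h4 hlen, nodup_coords0 pattern, ?_, hmem⟩
  obtain ⟨s, hs, ch, hch, hne⟩ := hex
  rw [List.mem_iff_getElem] at hs
  obtain ⟨k, hk, hks⟩ := hs
  subst hks
  rw [List.mem_iff_getElem] at hch
  obtain ⟨j, hj, hjs⟩ := hch
  refine List.ne_nil_of_mem (a := ((k : Int), (j : Int))) ?_
  rw [mem_coords0]
  exact ⟨k, hk, j, hj, by rw [hjs]; exact hne, rfl⟩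

-- ===== VERDICT (by name: the statement is the Claim_ definition above) =====
theorem rotations_from_pattern_spec : Claim_equal_rotations_from_pattern := by
  intro pattern _hdom hpre
  unfold Spec_rotations_from_pattern
  rw [portA_eq_fold, portB_eq_fold]
  exact loop_eq _ _ _ _ (init_inv pattern hpre)
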